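-- pv_equiv track=rewrite | github.com/tangledsnakes24/schoolpy | Python HW/alternatesums.py | weirdly_alternating_sum
-- ===== SOURCE A (Python) =====
-- def weirdly_alternating_sum(n, pos_count):
--     num2 = 0
--     counter = 0
--     for x in range(1, n+1):
--         if(counter < pos_count):
--             num2 = num2 + x
--             counter = counter + 1
--         else:
--             num2 = num2 - x
--             counter = 0
--     return(num2)
-- ===== SOURCE B (Python) =====
-- def weirdly_alternating_sum(n, pos_count):
--     # Closed form: the loop adds pos_count consecutive numbers then subtracts one,
--     # so it is periodic with period p = pos_count + 1; sum each block arithmetically.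
--     if n < 1:
--         return 0
--     if pos_count <= 0:
--         return -(n * (n + 1) // 2)
--     p = pos_count + 1
--     q, r = divmod(n, p)
--     return ((pos_count - 1) * p * q * (q - 1) // 2
--             + q * (pos_count * (pos_count + 1) // 2 - p)
--             + r * q * p
--             + r * (r + 1) // 2)
-- ===== Notes on version B (the rewrite author's own statement) =====
-- stated objective: faster
-- what changed: Replaced A's element-by-element loop (pos_count additions then one subtraction, periodic with period pos_count+1) by a closed-form arithmetic-series computation over complete blocks plus the partial tail.
import Mathlib
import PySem

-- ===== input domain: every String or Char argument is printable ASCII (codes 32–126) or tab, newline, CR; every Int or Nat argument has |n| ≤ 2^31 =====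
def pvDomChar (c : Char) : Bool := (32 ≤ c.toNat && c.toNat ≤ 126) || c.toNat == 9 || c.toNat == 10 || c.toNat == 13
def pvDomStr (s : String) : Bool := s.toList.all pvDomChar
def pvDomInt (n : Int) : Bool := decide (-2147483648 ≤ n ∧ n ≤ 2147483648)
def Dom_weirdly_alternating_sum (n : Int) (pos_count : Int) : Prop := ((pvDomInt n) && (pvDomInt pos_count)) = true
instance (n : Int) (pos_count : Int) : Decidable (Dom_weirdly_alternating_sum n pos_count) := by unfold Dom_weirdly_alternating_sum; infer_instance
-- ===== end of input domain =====

-- B replaces A's O(n) loop (pos_count additions then one subtraction, period pos_count+1)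
-- by O(1) closed-form block arithmetic; objective: faster (asymptotic).

-- ===== PORT A =====
-- A-side helper: the loop body (state = (num2, counter))
def pvStepA (pos_count : Int) (st : Int × Int) (x : Int) : Int × Int :=
  if st.2 < pos_count then (st.1 + x, st.2 + 1) else (st.1 - x, 0)

def weirdly_alternating_sum (n : Int) (pos_count : Int) : Int :=
  ((PySem.List.pyRange 1 (n + 1) 1).foldl (pvStepA pos_count) (0, 0)).1

-- ===== PORT B =====
def weirdly_alternating_sum_alt (n : Int) (pos_count : Int) : Int :=
  if n < 1 then 0
  else if pos_count ≤ 0 then -(PySem.Int.floordiv (n * (n + 1)) 2)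
  else
    let p := pos_count + 1
    let q := PySem.Int.floordiv n p
    let r := PySem.Int.mod n p
    PySem.Int.floordiv ((pos_count - 1) * p * q * (q - 1)) 2
      + q * (PySem.Int.floordiv (pos_count * (pos_count + 1)) 2 - p)
      + r * q * p
      + PySem.Int.floordiv (r * (r + 1)) 2

-- ===== PRECONDITION & SPEC =====
def Spec_weirdly_alternating_sum (n : Int) (pos_count : Int) (out : Int) : Prop := out = weirdly_alternating_sum_alt n pos_count
instance (n : Int) (pos_count : Int) (out : Int) : Decidable (Spec_weirdly_alternating_sum n pos_count out) := by unfold Spec_weirdly_alternating_sum; infer_instance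

-- ===== CLAIM (what is proved, stated in full; the proofs are below) =====
def Claim_equal_weirdly_alternating_sum : Prop := ∀ (n : Int) (pos_count : Int), Dom_weirdly_alternating_sum n pos_count → Spec_weirdly_alternating_sum n pos_count (weirdly_alternating_sum n pos_count)

-- ===== LEMMAS AND PROOFS =====

-- triangle numbers 1 + 2 + … + k
def pvTri : Nat → Int
  | 0 => 0
  | k + 1 => pvTri k + (k + 1)

lemma pvTri_two_mul (k : Nat) : 2 * pvTri k = (k : Int) * (k + 1) := by
  induction k with
  | zero => simp [pvTri]
  | succ k ih => simp only [pvTri]; push_cast; push_cast at ih; ring_nf; ring_nf at ih; linarith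

lemma pvTri_pred (q : Nat) : (q : Int) * ((q : Int) - 1) = 2 * pvTri (q - 1) := by
  cases q with
  | zero => simp [pvTri]
  | succ k => have := pvTri_two_mul k; push_cast; push_cast at this; linarith

lemma pvTri_succ_pred (q : Nat) : pvTri q = pvTri (q - 1) + q := by
  cases q with
  | zero => simp [pvTri]
  | succ k => simp [pvTri]

lemma pvFd2 (a b : Int) (h : a = 2 * b) : PySem.Int.floordiv a 2 = b := by
  rw [PySem.Int.floordiv_eq_ediv_of_pos (by norm_num), h]; omega

-- value of A's accumulator after q full blocks and r extra additions (pos_count ≥ 1)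
def pvG (pc : Int) (q r : Nat) : Int :=
  (pc - 1) * (pc + 1) * pvTri (q - 1) + (q : Int) * (pvTri pc.toNat - (pc + 1))
    + (r : Int) * (q : Int) * (pc + 1) + pvTri r

lemma pvLoop_nonpos (pc : Int) (hpc : pc ≤ 0) (m : Nat) :
    (PySem.List.pyRange 1 ((m : Int) + 1) 1).foldl (pvStepA pc) (0, 0) = (-(pvTri m), 0) := by
  induction m with
  | zero => rw [PySem.List.pyRange_one_eq_nil (by norm_num)]; simp [pvTri]
  | succ m ih =>
    have h1 : ((m + 1 : Nat) : Int) + 1 = ((m : Int) + 1) + 1 := by push_cast; ring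
    rw [h1, PySem.List.pyRange_one_succ_right (by omega), List.foldl_append, ih]
    simp only [List.foldl, pvStepA]
    rw [if_neg (by omega)]
    simp only [pvTri, Prod.mk.injEq]
    exact ⟨by ring, trivial⟩

lemma pvLoop_pos (pc : Int) (hpc : 1 ≤ pc) (m : Nat) :
    ∃ q r : Nat, (m : Int) = (q : Int) * (pc + 1) + r ∧ (r : Int) < pc + 1 ∧
      (PySem.List.pyRange 1 ((m : Int) + 1) 1).foldl (pvStepA pc) (0, 0) = (pvG pc q r, (r : Int)) := by
  induction m with
  | zero =>
    refine ⟨0, 0, by simp, by omega, ?_⟩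
    rw [PySem.List.pyRange_one_eq_nil (by norm_num)]
    simp [pvG, pvTri]
  | succ m ih =>
    obtain ⟨q, r, hm, hr, hfold⟩ := ih
    have h1 : ((m + 1 : Nat) : Int) + 1 = ((m : Int) + 1) + 1 := by push_cast; ring
    rw [h1, PySem.List.pyRange_one_succ_right (by omega), List.foldl_append, hfold]
    by_cases hc : (r : Int) < pc
    · refine ⟨q, r + 1, by push_cast; linarith [hm], by push_cast; linarith, ?_⟩
      simp only [List.foldl, pvStepA, if_pos hc, Prod.mk.injEq]
      refine ⟨?_, by push_cast; ring⟩
      show pvG pc q r + ((m : Int) + 1) = pvG pc q (r + 1)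
      simp only [pvG, pvTri]
      push_cast
      linear_combination hm
    · -- counter hit pos_count: r = pc, subtract and reset
      have hrpc : (r : Int) = pc := by omega
      have hq : r = pc.toNat := by omega
      refine ⟨q + 1, 0, ?_, by omega, ?_⟩
      · push_cast; linear_combination hm + hrpc
      · simp only [List.foldl, pvStepA, if_neg (by omega), Prod.mk.injEq]
        refine ⟨?_, by norm_num⟩
        show pvG pc q r - ((m : Int) + 1) = pvG pc (q + 1) 0
        subst hq
        have hcast : ((pc.toNat : Nat) : Int) = pc := Int.toNat_of_nonneg (by linarith)
        simp only [pvG, Nat.add_sub_cancel, pvTri]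
        rw [hcast] at hm ⊢
        push_cast
        linear_combination -hm - (pc ^ 2 - 1) * (pvTri_succ_pred q)

lemma pv_nonpos_case (n pc : Int) (hn : ¬ n < 1) (hpc : pc ≤ 0) :
    weirdly_alternating_sum n pc = -(PySem.Int.floordiv (n * (n + 1)) 2) := by
  have hn' : ((n.toNat : Nat) : Int) = n := Int.toNat_of_nonneg (by omega)
  have h := pvLoop_nonpos pc hpc n.toNat
  rw [hn'] at h
  rw [weirdly_alternating_sum, h]
  have : PySem.Int.floordiv (n * (n + 1)) 2 = pvTri n.toNat := by
    apply pvFd2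
    rw [← hn']; exact_mod_cast (by push_cast [pvTri_two_mul n.toNat]; ring_nf :
      ((n.toNat : Int)) * ((n.toNat : Int) + 1) = 2 * pvTri n.toNat)
  rw [this]

lemma pv_pos_case (n pc : Int) (hn : ¬ n < 1) (hpc : ¬ pc ≤ 0) :
    weirdly_alternating_sum n pc =
      PySem.Int.floordiv ((pc - 1) * (pc + 1) * (PySem.Int.floordiv n (pc + 1)) * ((PySem.Int.floordiv n (pc + 1)) - 1)) 2
        + (PySem.Int.floordiv n (pc + 1)) * (PySem.Int.floordiv (pc * (pc + 1)) 2 - (pc + 1))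
        + (PySem.Int.mod n (pc + 1)) * (PySem.Int.floordiv n (pc + 1)) * (pc + 1)
        + PySem.Int.floordiv ((PySem.Int.mod n (pc + 1)) * ((PySem.Int.mod n (pc + 1)) + 1)) 2 := by
  have hn' : ((n.toNat : Nat) : Int) = n := Int.toNat_of_nonneg (by omega)
  obtain ⟨q, r, hm, hr, hfold⟩ := pvLoop_pos pc (by omega) n.toNat
  rw [hn'] at hm hfold
  have hdiv : PySem.Int.floordiv n (pc + 1) = (q : Int) := by
    rw [PySem.Int.floordiv_eq_iff_of_pos (by omega)]
    constructor
    · have : (0 : Int) ≤ (r : Int) := by positivity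
      linarith [hm]
    · have h2 : (q + 1 : Int) * (pc + 1) = (q : Int) * (pc + 1) + (pc + 1) := by ring
      rw [h2]; linarith [hm]
  have hmod : PySem.Int.mod n (pc + 1) = (r : Int) := by
    have := PySem.Int.floordiv_mul_add_mod n (pc + 1)
    rw [hdiv] at this; linarith [hm]
  have hcast : ((pc.toNat : Nat) : Int) = pc := Int.toNat_of_nonneg (by omega)
  rw [weirdly_alternating_sum, hfold, hdiv, hmod]
  rw [pvFd2 _ ((pc - 1) * (pc + 1) * pvTri (q - 1)) (by linear_combination ((pc - 1) * (pc + 1)) * pvTri_pred q)]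
  have hT := pvTri_two_mul pc.toNat
  rw [hcast] at hT
  rw [pvFd2 (pc * (pc + 1)) (pvTri pc.toNat) (by linarith [hT])]
  rw [pvFd2 ((r : Int) * ((r : Int) + 1)) (pvTri r) (by linear_combination - (pvTri_two_mul r))]
  simp only [pvG]

-- ===== VERDICT (by name: the statement is the Claim_ definition above) =====
theorem weirdly_alternating_sum_spec : Claim_equal_weirdly_alternating_sum := by
  intro n pc _
  show weirdly_alternating_sum n pc = weirdly_alternating_sum_alt n pc
  unfold weirdly_alternating_sum_alt
  by_cases hn : n < 1
  · rw [if_pos hn, weirdly_alternating_sum, PySem.List.pyRange_one_eq_nil (by omega)]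
    rfl
  · rw [if_neg hn]
    by_cases hpc : pc ≤ 0
    · rw [if_pos hpc]; exact pv_nonpos_case n pc hn hpc
    · rw [if_neg hpc]; exact pv_pos_case n pc hn hpc
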